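-- pv_equiv track=rewrite | github.com/Shubhamm33/AOC-23 | day4/day4.py | check_my_number_in_winning_number
-- ===== SOURCE A (Python) =====
-- def check_my_number_in_winning_number(win_nums, my_nums):
--     points = 0
--     initial = True
--     for n in my_nums:
--         if n in win_nums:
--             if initial:
--                 points += 1
--                 initial = False
--             else:
--                 points *= 2
--
--     # logger.info(f"Points: {points}")
--
--     return points
-- ===== SOURCE B (Python) =====
-- def check_my_number_in_winning_number(win_nums, my_nums):
--     count = sum(1 for n in my_nums if n in win_nums)
--     return 0 if count == 0 else 2 ** (count - 1)
-- ===== Notes on version B (the rewrite author's own statement) =====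
-- stated objective: simpler
-- what changed: Replaces the stateful first-match-adds-1/then-doubling accumulator loop by counting matches once and returning the closed form 2**(count-1) (0 when count is 0).
import Mathlib
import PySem

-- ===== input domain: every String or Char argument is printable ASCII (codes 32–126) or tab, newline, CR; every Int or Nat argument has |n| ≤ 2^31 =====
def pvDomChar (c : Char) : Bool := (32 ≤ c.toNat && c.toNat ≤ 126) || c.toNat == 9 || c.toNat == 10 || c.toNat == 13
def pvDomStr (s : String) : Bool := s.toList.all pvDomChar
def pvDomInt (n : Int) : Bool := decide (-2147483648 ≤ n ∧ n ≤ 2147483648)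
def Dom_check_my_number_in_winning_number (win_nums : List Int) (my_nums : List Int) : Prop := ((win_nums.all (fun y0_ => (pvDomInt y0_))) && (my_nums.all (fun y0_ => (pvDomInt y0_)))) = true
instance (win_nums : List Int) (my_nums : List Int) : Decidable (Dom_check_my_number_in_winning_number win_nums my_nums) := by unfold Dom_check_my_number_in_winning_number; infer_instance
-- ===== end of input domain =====

-- ===== PORT A =====
-- B replaces A's stateful accumulator loop by a match count and the closed form 2^(count-1); equally costly, simpler.
def check_my_number_in_winning_number (win_nums : List Int) (my_nums : List Int) : Int :=
  (my_nums.foldl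
    (fun (st : Int × Bool) n =>
      if win_nums.contains n then
        if st.2 then (st.1 + 1, false) else (st.1 * 2, st.2)
      else st)
    (0, true)).1

-- ===== PORT B =====
def check_my_number_in_winning_number_alt (win_nums : List Int) (my_nums : List Int) : Int :=
  let count : Nat := my_nums.countP (fun n => win_nums.contains n)
  if count = 0 then 0 else (2 : Int) ^ (count - 1)

-- ===== PRECONDITION & SPEC =====
def Spec_check_my_number_in_winning_number (win_nums : List Int) (my_nums : List Int) (out : Int) : Prop := out = check_my_number_in_winning_number_alt win_nums my_nums
instance (win_nums : List Int) (my_nums : List Int) (out : Int) : Decidable (Spec_check_my_number_in_winning_number win_nums my_nums out) := by unfold Spec_check_my_number_in_winning_number; infer_instance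

-- ===== CLAIM (what is proved, stated in full; the proofs are below) =====
def Claim_equal_check_my_number_in_winning_number : Prop := ∀ (win_nums : List Int) (my_nums : List Int), Dom_check_my_number_in_winning_number win_nums my_nums → Spec_check_my_number_in_winning_number win_nums my_nums (check_my_number_in_winning_number win_nums my_nums)

-- ===== LEMMAS AND PROOFS =====

-- ===== VERDICT (by name: the statement is the Claim_ definition above) =====
-- loop invariant: starting from the state reached after k matches, the fold ends
-- in the state corresponding to k plus the number of matches in the rest
theorem pv_fold_inv (win_nums : List Int) (my_nums : List Int) (k : Nat) :
    my_nums.foldl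
      (fun (st : Int × Bool) n =>
        if win_nums.contains n then
          if st.2 then (st.1 + 1, false) else (st.1 * 2, st.2)
        else st)
      (if k = 0 then ((0 : Int), true) else ((2 : Int) ^ (k - 1), false))
    = (if k + my_nums.countP (fun n => win_nums.contains n) = 0 then ((0 : Int), true)
       else ((2 : Int) ^ (k + my_nums.countP (fun n => win_nums.contains n) - 1), false)) := by
  induction my_nums generalizing k with
  | nil => simp
  | cons n rest ih =>
    simp only [List.foldl_cons, List.countP_cons]
    by_cases h : win_nums.contains n = true
    · have step :
          (if win_nums.contains n then
            (if (if k = 0 then ((0 : Int), true) else ((2 : Int) ^ (k - 1), false)).2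
              then ((if k = 0 then ((0 : Int), true) else ((2 : Int) ^ (k - 1), false)).1 + 1, false)
              else ((if k = 0 then ((0 : Int), true) else ((2 : Int) ^ (k - 1), false)).1 * 2,
                (if k = 0 then ((0 : Int), true) else ((2 : Int) ^ (k - 1), false)).2))
            else (if k = 0 then ((0 : Int), true) else ((2 : Int) ^ (k - 1), false)))
          = (if k + 1 = 0 then ((0 : Int), true) else ((2 : Int) ^ (k + 1 - 1), false)) := by
        rw [if_pos h]
        rcases Nat.eq_zero_or_pos k with hk | hk
        · subst hk; norm_num
        · have hk0 : k ≠ 0 := Nat.pos_iff_ne_zero.mp hk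
          simp only [if_neg hk0, Nat.add_sub_cancel]
          have h2 : (2 : Int) ^ (k - 1) * 2 = 2 ^ k := by
            rw [← pow_succ]; congr 1; omega
          simp [h2]
      rw [step, ih (k + 1)]
      have hcnt : k + 1 + rest.countP (fun n => win_nums.contains n)
          = k + (rest.countP (fun n => win_nums.contains n) + if win_nums.contains n then 1 else 0) := by
        rw [if_pos h]; omega
      rw [hcnt]
    · rw [if_neg h, ih k]
      have hcnt : k + rest.countP (fun n => win_nums.contains n)
          = k + (rest.countP (fun n => win_nums.contains n) + if win_nums.contains n then 1 else 0) := by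
        rw [if_neg h]; omega
      rw [hcnt]

theorem check_my_number_in_winning_number_spec : Claim_equal_check_my_number_in_winning_number := by
  intro win_nums my_nums _
  unfold Spec_check_my_number_in_winning_number check_my_number_in_winning_number check_my_number_in_winning_number_alt
  have h := pv_fold_inv win_nums my_nums 0
  rw [if_pos rfl] at h
  simp only [Nat.zero_add] at h
  rw [h]
  split <;> simp_all
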